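-- pv_equiv track=rewrite | github.com/meher4567/intellimatch-ai-resume-screening | src/services/enhanced_quality_scorer.py | _prioritize_improvements
-- ===== SOURCE A (Python) =====
-- from typing import Dict, Any, List, Optional, Set
--
-- def _prioritize_improvements(improvements: List, scores: Dict) -> List:
--     """Sort improvements by impact (lowest scoring areas first)"""
--     # Simple prioritization based on score gaps
--     priority_map = {
--         "Email": 100,
--         "phone": 90,
--         "Professional Summary": 85,
--         "experience": 80,
--         "Skills": 75,
--         "Education": 70,
--         "dates": 65,
--         "metrics": 60,
--         "action verbs": 55,
--         "LinkedIn": 40,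
--         "categories": 30,
--     }
--
--     def get_priority(imp: str) -> int:
--         for key, priority in priority_map.items():
--             if key.lower() in imp.lower():
--                 return priority
--         return 50
--
--     return sorted(improvements, key=get_priority, reverse=True)
-- ===== SOURCE B (Python) =====
-- def _prioritize_improvements(improvements, scores):
--     """Sort improvements by impact (lowest scoring areas first)"""
--     priority_map = {
--         "Email": 100,
--         "phone": 90,
--         "Professional Summary": 85,
--         "experience": 80,
--         "Skills": 75,
--         "Education": 70,
--         "dates": 65,
--         "metrics": 60,
--         "action verbs": 55,
--         "LinkedIn": 40,
--         "categories": 30,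
--     }
--
--     def get_priority(imp):
--         low = imp.lower()
--         return next((p for k, p in priority_map.items() if k.lower() in low), 50)
--
--     # Pigeonhole sweep instead of a comparison sort: the key takes only twelve
--     # values, so sweep them in descending order and emit the improvements of
--     # each priority in their original order (= the stable descending sort).
--     pri = [get_priority(imp) for imp in improvements]
--     result = []
--     for p in (100, 90, 85, 80, 75, 70, 65, 60, 55, 50, 40, 30):
--         result.extend(imp for imp, q in zip(improvements, pri) if q == p)
--     return result
-- ===== Notes on version B (the rewrite author's own statement) =====
-- stated objective: alternative
-- what changed: Replaces the comparison sort (sorted with key, reverse=True) by a pigeonhole sweep: priorities are computed once per improvement, then the twelve possible priority values are swept in descending order, concatenating each value's improvements in original order; get_priority is a next(...) over the map instead of an explicit loop.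
import Mathlib
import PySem

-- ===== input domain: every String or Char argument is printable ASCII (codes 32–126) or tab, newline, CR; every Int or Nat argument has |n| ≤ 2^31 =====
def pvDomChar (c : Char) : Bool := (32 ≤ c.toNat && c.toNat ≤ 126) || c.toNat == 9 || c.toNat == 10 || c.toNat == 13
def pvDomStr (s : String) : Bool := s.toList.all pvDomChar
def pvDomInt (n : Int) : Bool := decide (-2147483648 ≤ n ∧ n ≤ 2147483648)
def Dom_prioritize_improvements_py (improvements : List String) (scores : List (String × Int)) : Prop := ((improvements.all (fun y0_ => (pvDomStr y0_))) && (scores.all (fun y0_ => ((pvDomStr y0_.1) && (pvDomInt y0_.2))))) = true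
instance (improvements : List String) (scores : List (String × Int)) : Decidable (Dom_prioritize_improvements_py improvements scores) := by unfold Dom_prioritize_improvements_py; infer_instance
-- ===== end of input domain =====

-- B replaces A's comparison sort by a pigeonhole sweep over the twelve possible priority
-- values (descending, each emitting its matches in original order); objective: alternative algorithm, same measured cost.


-- ===== PORT A =====
-- the priority_map dict, in insertion order
def pvPriorityMap : List (String × Int) :=
  [("Email", 100), ("phone", 90), ("Professional Summary", 85), ("experience", 80),
   ("Skills", 75), ("Education", 70), ("dates", 65), ("metrics", 60),
   ("action verbs", 55), ("LinkedIn", 40), ("categories", 30)]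

-- A's get_priority: explicit loop, first key of the map whose lowered key is a
-- substring of the lowered input, default 50
def pvGetPriority : List (String × Int) → String → Int
  | [], _ => 50
  | (k, p) :: rest, imp =>
      if PySem.Str.isIn (PySem.Str.lower k) (PySem.Str.lower imp) then p
      else pvGetPriority rest imp

def prioritize_improvements_py (improvements : List String) (scores : List (String × Int)) : List String :=
  PySem.List.sorted improvements (fun imp => pvGetPriority pvPriorityMap imp) true

-- ===== PORT B =====
-- B's get_priority: next((p for k, p in priority_map.items() if k.lower() in low), 50)
def pvGetPriorityB (imp : String) : Int :=
  let low := PySem.Str.lower imp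
  ((pvPriorityMap.find? (fun kp => PySem.Str.isIn (PySem.Str.lower kp.1) low)).map Prod.snd).getD 50

-- the tuple of possible priority values, in descending order
def pvPriorities : List Int := [100, 90, 85, 80, 75, 70, 65, 60, 55, 50, 40, 30]

def prioritize_improvements_py_alt (improvements : List String) (scores : List (String × Int)) : List String :=
  -- pri = [get_priority(imp) for imp in improvements]
  let pri := improvements.map pvGetPriorityB
  -- for p in (...): result.extend(imp for imp, q in zip(improvements, pri) if q == p)
  pvPriorities.foldl
    (fun result p =>
      result ++ ((improvements.zip pri).filter (fun iq => iq.2 == p)).map Prod.fst) []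

-- ===== PRECONDITION & SPEC =====
def Spec_prioritize_improvements_py (improvements : List String) (scores : List (String × Int)) (out : List String) : Prop := out = prioritize_improvements_py_alt improvements scores
instance (improvements : List String) (scores : List (String × Int)) (out : List String) : Decidable (Spec_prioritize_improvements_py improvements scores out) := by unfold Spec_prioritize_improvements_py; infer_instance

-- ===== CLAIM (what is proved, stated in full; the proofs are below) =====
def Claim_equal_prioritize_improvements_py : Prop := ∀ (improvements : List String) (scores : List (String × Int)), Dom_prioritize_improvements_py improvements scores → Spec_prioritize_improvements_py improvements scores (prioritize_improvements_py improvements scores)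

-- ===== LEMMAS AND PROOFS =====

-- B's find?-based lookup computes the same priority as A's loop
lemma pv_getB_eq (imp : String) : pvGetPriorityB imp = pvGetPriority pvPriorityMap imp := by
  show ((pvPriorityMap.find? _).map Prod.snd).getD 50 = _
  induction pvPriorityMap with
  | nil => rfl
  | cons kp rest ih =>
      obtain ⟨k, p⟩ := kp
      simp only [pvGetPriority]
      by_cases h : PySem.Str.isIn (PySem.Str.lower k) (PySem.Str.lower imp) = true
      · simp only [List.find?_cons, h, Option.map_some, Option.getD_some, if_true]
      · have h' : PySem.Str.isIn (PySem.Str.lower k) (PySem.Str.lower imp) = false := by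
          simpa using h
        simp only [List.find?_cons, h', Bool.false_eq_true, if_false]
        exact ih

-- every value get_priority can return is one of the twelve bucket priorities
lemma pv_aux_mem : ∀ (m : List (String × Int)) (s : String),
    pvGetPriority m s = 50 ∨ pvGetPriority m s ∈ m.map Prod.snd := by
  intro m
  induction m with
  | nil => intro s; left; rfl
  | cons kp rest ih =>
      intro s
      obtain ⟨k, p⟩ := kp
      simp only [pvGetPriority]
      by_cases h : PySem.Str.isIn (PySem.Str.lower k) (PySem.Str.lower s) = true
      · rw [if_pos h]; right; simp
      · rw [if_neg h]
        rcases ih s with h50 | hmem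
        · left; exact h50
        · right; simp only [List.map_cons, List.mem_cons]; right; exact hmem

lemma pv_prio_mem (s : String) : pvGetPriority pvPriorityMap s ∈ pvPriorities := by
  rcases pv_aux_mem pvPriorityMap s with h | h
  · rw [h]; decide
  · generalize pvGetPriority pvPriorityMap s = v at h ⊢
    simp [pvPriorityMap] at h
    simp only [pvPriorities, List.mem_cons, List.not_mem_nil, or_false]
    tauto

-- insertBy passes over a prefix it does not go before
lemma pv_insertBy_append_left {α : Type} (before : α → α → Bool) (x : α) (l1 l2 : List α)
    (h : ∀ y ∈ l1, before x y = false) :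
    PySem.List.insertBy before x (l1 ++ l2) = l1 ++ PySem.List.insertBy before x l2 := by
  induction l1 with
  | nil => simp
  | cons y t ih =>
      have hy := h y (by simp)
      simp only [List.cons_append, PySem.List.insertBy, hy, Bool.false_eq_true, if_false]
      rw [ih (fun z hz => h z (by simp [hz]))]

-- insertBy goes in front of a list it goes before everywhere
lemma pv_insertBy_all_before {α : Type} (before : α → α → Bool) (x : α) (l : List α)
    (h : ∀ y ∈ l, before x y = true) :
    PySem.List.insertBy before x l = x :: l := by
  cases l with
  | nil => rfl
  | cons y t => simp [PySem.List.insertBy, h y (by simp)]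

-- inserting one element into a descending bucket concatenation appends it to its bucket
lemma pv_insert_flatMap {α : Type} (key : α → Int) (x : α) :
    ∀ (P : List Int) (g : Int → List α), P.Pairwise (· > ·) → key x ∈ P →
      (∀ p ∈ P, ∀ y ∈ g p, key y = p) →
      PySem.List.insertBy (fun a b => decide (key b < key a)) x (P.flatMap g)
        = P.flatMap (fun p => g p ++ if key x = p then [x] else []) := by
  intro P
  induction P with
  | nil => intro g _ hx _; simp at hx
  | cons p P' ih =>
      intro g hP hx hg
      have hgp : ∀ y ∈ g p, key y = p := hg p (by simp)
      have hgt : ∀ q ∈ P', p > q := (List.pairwise_cons.mp hP).1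
      by_cases hxp : key x = p
      · -- x belongs to the head bucket: pass over g p, insert before the rest
        have hpass : ∀ y ∈ g p, (fun a b => decide (key b < key a)) x y = false := by
          intro y hy; simp [hgp y hy, hxp]
        have hrest : ∀ y ∈ P'.flatMap g, (fun a b => decide (key b < key a)) x y = true := by
          intro y hy
          obtain ⟨q, hq, hyq⟩ := List.mem_flatMap.mp hy
          have := hg q (by simp [hq]) y hyq
          simp [this, hxp]; exact hgt q hq
        have hnotin : ∀ q ∈ P', key x ≠ q := by
          intro q hq h; exact absurd (h ▸ hxp ▸ hgt q hq).lt (lt_irrefl _)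
        simp only [List.flatMap_cons]
        rw [pv_insertBy_append_left _ _ _ _ hpass, pv_insertBy_all_before _ _ _ hrest]
        have hcong : P'.flatMap (fun q => g q ++ if key x = q then [x] else []) = P'.flatMap g :=
          List.flatMap_congr (fun q hq => by simp [hnotin q hq])
        simp only [if_pos hxp, hcong]
        simp
      · -- x belongs to a later bucket: pass over g p and recurse
        have hx' : key x ∈ P' := by
          rcases List.mem_cons.mp hx with h | h
          · exact absurd h hxp
          · exact h
        have hlt : key x < p := hgt _ hx'
        have hpass : ∀ y ∈ g p, (fun a b => decide (key b < key a)) x y = false := by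
          intro y hy; simp [hgp y hy]; omega
        simp only [List.flatMap_cons]
        rw [pv_insertBy_append_left _ _ _ _ hpass,
            ih g (List.pairwise_cons.mp hP).2 hx' (fun q hq => hg q (by simp [hq]))]
        simp [hxp]

-- a stable descending sort by priority is the concatenation of the priority buckets
lemma pv_sorted_eq (xs : List String) :
    PySem.List.sorted xs (fun imp => pvGetPriority pvPriorityMap imp) true
      = pvPriorities.flatMap
          (fun p => xs.filter (fun x => pvGetPriority pvPriorityMap x == p)) := by
  induction xs using List.reverseRecOn with
  | nil => simp [PySem.List.sorted]
  | append_singleton xs x ih =>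
      rw [PySem.List.sorted_rev_eq_foldl_insertBy, List.foldl_append, List.foldl_cons,
          List.foldl_nil, ← PySem.List.sorted_rev_eq_foldl_insertBy, ih,
          pv_insert_flatMap (fun imp => pvGetPriority pvPriorityMap imp) x pvPriorities _
            (by decide) (pv_prio_mem x)
            (fun p _ y hy => by
              have := List.of_mem_filter hy
              simpa using this)]
      refine List.flatMap_congr (fun p _ => ?_)
      rw [List.filter_append]
      by_cases h : pvGetPriority pvPriorityMap x = p <;> simp [h]

-- zipping a list with its mapped priorities, filtering on the priority and projecting
-- back is the same as filtering directly
lemma pv_zip_filter (f : String → Int) (p : Int) : ∀ (xs : List String),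
    (((xs.zip (xs.map f)).filter (fun iq => iq.2 == p)).map Prod.fst)
      = xs.filter (fun x => f x == p) := by
  intro xs
  induction xs with
  | nil => rfl
  | cons x t ih =>
      simp only [List.map_cons, List.zip_cons_cons, List.filter_cons]
      by_cases h : f x = p
      · simp [h, ih]
      · simp [h, ih]

-- ===== VERDICT (by name: the statement is the Claim_ definition above) =====
theorem prioritize_improvements_py_spec : Claim_equal_prioritize_improvements_py := by
  intro improvements scores _
  show prioritize_improvements_py improvements scores
        = prioritize_improvements_py_alt improvements scores
  unfold prioritize_improvements_py prioritize_improvements_py_alt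
  rw [pv_sorted_eq, PySem.List.foldl_append_eq_flatMap, List.nil_append]
  exact List.flatMap_congr (fun p _ => by
    rw [pv_zip_filter]
    simp only [pv_getB_eq])
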